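-- pv_equiv track=rewrite | github.com/prashantgupta123/aws-ecs-service-recommendations | app.py | _get_health_summary
-- ===== SOURCE A (Python) =====
-- from typing import Dict, List, Optional
--
-- def _get_health_summary(results: Dict) -> Dict:
--     """Generate health summary from cluster results"""
--     health_counts = {"good": 0, "warning": 0, "critical": 0, "error": 0, "unknown": 0}
--     scaling_counts = {"scale_up": 0, "scale_down": 0, "no_change": 0}
--     priority_counts = {"high": 0, "medium": 0, "low": 0}
--
--     for cluster_services in results.values():
--         for service in cluster_services:
--             health = service.get("service_health", "unknown")
--             scaling = service.get("scaling_action", "no_change")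
--             priority = service.get("priority", "medium")
--
--             health_counts[health] = health_counts.get(health, 0) + 1
--             scaling_counts[scaling] = scaling_counts.get(scaling, 0) + 1
--             priority_counts[priority] = priority_counts.get(priority, 0) + 1
--
--     return {
--         "health_distribution": health_counts,
--         "scaling_distribution": scaling_counts,
--         "priority_distribution": priority_counts,
--     }
-- ===== SOURCE B (Python) =====
-- def _get_health_summary(results):
--     """Generate health summary from cluster results"""
--     services = [s for cluster_services in results.values() for s in cluster_services]
--
--     def count_field(key, default, base):
--         counts = dict(base)
--         for service in services:
--             value = service.get(key, default)
--             counts[value] = counts.get(value, 0) + 1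
--         return counts
--
--     return {
--         "health_distribution": count_field(
--             "service_health", "unknown",
--             {"good": 0, "warning": 0, "critical": 0, "error": 0, "unknown": 0}),
--         "scaling_distribution": count_field(
--             "scaling_action", "no_change",
--             {"scale_up": 0, "scale_down": 0, "no_change": 0}),
--         "priority_distribution": count_field(
--             "priority", "medium",
--             {"high": 0, "medium": 0, "low": 0}),
--     }
-- ===== Notes on version B (the rewrite author's own statement) =====
-- stated objective: simpler
-- what changed: Flatten all services once, then a single generic helper (seed dict + one pass per field) replaces the nested loops that interleave three accumulators.
import Mathlib
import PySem

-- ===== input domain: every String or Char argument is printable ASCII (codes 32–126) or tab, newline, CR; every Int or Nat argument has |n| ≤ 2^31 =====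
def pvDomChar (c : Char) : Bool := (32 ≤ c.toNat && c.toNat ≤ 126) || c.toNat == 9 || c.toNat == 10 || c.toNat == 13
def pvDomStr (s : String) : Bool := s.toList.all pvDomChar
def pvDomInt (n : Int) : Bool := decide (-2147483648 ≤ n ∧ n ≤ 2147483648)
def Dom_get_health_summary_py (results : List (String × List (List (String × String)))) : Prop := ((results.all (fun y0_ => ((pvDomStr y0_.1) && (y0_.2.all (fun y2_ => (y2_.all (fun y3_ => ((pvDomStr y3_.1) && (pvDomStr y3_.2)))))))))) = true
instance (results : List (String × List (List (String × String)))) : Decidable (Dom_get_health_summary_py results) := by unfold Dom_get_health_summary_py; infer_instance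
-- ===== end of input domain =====

-- B flattens all services once and counts each field with a single generic helper
-- (seed dict + one pass per field), replacing A's nested loops over three interleaved accumulators.

-- ===== PORT A =====
-- one iteration of A's inner loop body: update all three counters for one service
def pvAStep (st : PySem.Dict String Int × PySem.Dict String Int × PySem.Dict String Int)
    (service : List (String × String)) :
    PySem.Dict String Int × PySem.Dict String Int × PySem.Dict String Int :=
  let d := PySem.Dict.ofList service
  let health := d.getD "service_health" "unknown"
  let scaling := d.getD "scaling_action" "no_change"
  let priority := d.getD "priority" "medium"
  (st.1.insert health (st.1.getD health 0 + 1),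
   st.2.1.insert scaling (st.2.1.getD scaling 0 + 1),
   st.2.2.insert priority (st.2.2.getD priority 0 + 1))

def get_health_summary_py (results : List (String × List (List (String × String)))) :
    List (String × List (String × Int)) :=
  let health_counts : PySem.Dict String Int :=
    PySem.Dict.ofList [("good", 0), ("warning", 0), ("critical", 0), ("error", 0), ("unknown", 0)]
  let scaling_counts : PySem.Dict String Int :=
    PySem.Dict.ofList [("scale_up", 0), ("scale_down", 0), ("no_change", 0)]
  let priority_counts : PySem.Dict String Int :=
    PySem.Dict.ofList [("high", 0), ("medium", 0), ("low", 0)]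
  let fin := (results.map (·.2)).foldl
    (fun st cluster_services => cluster_services.foldl pvAStep st)
    (health_counts, scaling_counts, priority_counts)
  [("health_distribution", fin.1.items),
   ("scaling_distribution", fin.2.1.items),
   ("priority_distribution", fin.2.2.items)]

-- ===== PORT B =====
-- count_field: copy the base dict, then one pass over the flattened services
def pvCountField (services : List (List (String × String))) (key dflt : String)
    (base : PySem.Dict String Int) : PySem.Dict String Int :=
  services.foldl
    (fun counts service =>
      let value := (PySem.Dict.ofList service).getD key dflt
      counts.insert value (counts.getD value 0 + 1))
    base

def get_health_summary_py_alt (results : List (String × List (List (String × String)))) :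
    List (String × List (String × Int)) :=
  let services := (results.map (·.2)).flatten
  [("health_distribution",
    (pvCountField services "service_health" "unknown"
      (PySem.Dict.ofList [("good", 0), ("warning", 0), ("critical", 0), ("error", 0), ("unknown", 0)])).items),
   ("scaling_distribution",
    (pvCountField services "scaling_action" "no_change"
      (PySem.Dict.ofList [("scale_up", 0), ("scale_down", 0), ("no_change", 0)])).items),
   ("priority_distribution",
    (pvCountField services "priority" "medium"
      (PySem.Dict.ofList [("high", 0), ("medium", 0), ("low", 0)])).items)]

-- ===== PRECONDITION & SPEC =====
def Spec_get_health_summary_py (results : List (String × List (List (String × String)))) (out : List (String × List (String × Int))) : Prop := out = get_health_summary_py_alt results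
instance (results : List (String × List (List (String × String)))) (out : List (String × List (String × Int))) : Decidable (Spec_get_health_summary_py results out) := by unfold Spec_get_health_summary_py; infer_instance

-- ===== CLAIM (what is proved, stated in full; the proofs are below) =====
def Claim_equal_get_health_summary_py : Prop := ∀ (results : List (String × List (List (String × String)))), Dom_get_health_summary_py results → Spec_get_health_summary_py results (get_health_summary_py results)

-- ===== LEMMAS AND PROOFS =====

-- A's interleaved triple-accumulator fold splits into three independent folds.
theorem pvAStep_split (l : List (List (String × String)))
    (hs sc pr : PySem.Dict String Int) :
    l.foldl pvAStep (hs, sc, pr) =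
      (pvCountField l "service_health" "unknown" hs,
       pvCountField l "scaling_action" "no_change" sc,
       pvCountField l "priority" "medium" pr) := by
  induction l generalizing hs sc pr with
  | nil => rfl
  | cons s t ih => simp [pvCountField, pvAStep, List.foldl_cons, ih]

-- A's nested fold over the clusters is the fold over the flattened service list.
theorem pv_nested_eq_flatten (ls : List (List (List (String × String))))
    (st : PySem.Dict String Int × PySem.Dict String Int × PySem.Dict String Int) :
    ls.foldl (fun st cluster_services => cluster_services.foldl pvAStep st) st =
      ls.flatten.foldl pvAStep st := by
  induction ls generalizing st with
  | nil => rfl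
  | cons c t ih => simp [List.foldl_cons, List.flatten_cons, List.foldl_append, ih]

-- ===== VERDICT (by name: the statement is the Claim_ definition above) =====
theorem get_health_summary_py_spec : Claim_equal_get_health_summary_py := by
  intro results _
  unfold Spec_get_health_summary_py get_health_summary_py get_health_summary_py_alt
  simp only []
  rw [pv_nested_eq_flatten, pvAStep_split]
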